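-- pv_equiv track=rewrite | github.com/eliottcassidy2000/math | 04-computation/h_positivity_test.py | tournament_from_bits
-- ===== SOURCE A (Python) =====
-- def tournament_from_bits(bits, n):
--     """Convert bitmask to adjacency dict. Non-path arcs only."""
--     adj = {}
--     for i in range(n):
--         for j in range(n):
--             if i != j:
--                 adj[(i,j)] = 0
--     # Path arcs: i -> i+1
--     for i in range(n-1):
--         adj[(i,i+1)] = 1
--     # Non-path arcs: enumerated in a specific order
--     idx = 0
--     for gap in range(2, n):
--         for i in range(n - gap):
--             j = i + gap
--             if (bits >> idx) & 1:
--                 adj[(i,j)] = 1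
--                 adj[(j,i)] = 0
--             else:
--                 adj[(j,i)] = 1
--                 adj[(i,j)] = 0
--             idx += 1
--     return adj
-- ===== SOURCE B (Python) =====
-- def tournament_from_bits(bits, n):
--     """Convert bitmask to adjacency dict. Non-path arcs only."""
--     def val(i, j):
--         if j == i + 1:
--             return 1
--         if i == j + 1:
--             return 0
--         lo, hi = (i, j) if i < j else (j, i)
--         gap = hi - lo
--         idx = (gap - 2) * n - ((gap - 1) * gap // 2 - 1) + lo
--         b = (bits >> idx) & 1
--         return b if i < j else 1 - b
--     return {(i, j): val(i, j) for i in range(n) for j in range(n) if i != j}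
-- ===== Notes on version B (the rewrite author's own statement) =====
-- stated objective: alternative
-- what changed: Replaces A's three sequential passes (zero-init of all ordered pairs, path-arc pass, gap-ordered pass driven by a running bit counter) with a single row-major pass that computes each arc's final value directly, using a closed-form triangular-number bit index (gap-2)*n - ((gap-1)*gap//2 - 1) + i instead of the sequential idx counter, so no dict entry is ever overwritten.
import Mathlib
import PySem

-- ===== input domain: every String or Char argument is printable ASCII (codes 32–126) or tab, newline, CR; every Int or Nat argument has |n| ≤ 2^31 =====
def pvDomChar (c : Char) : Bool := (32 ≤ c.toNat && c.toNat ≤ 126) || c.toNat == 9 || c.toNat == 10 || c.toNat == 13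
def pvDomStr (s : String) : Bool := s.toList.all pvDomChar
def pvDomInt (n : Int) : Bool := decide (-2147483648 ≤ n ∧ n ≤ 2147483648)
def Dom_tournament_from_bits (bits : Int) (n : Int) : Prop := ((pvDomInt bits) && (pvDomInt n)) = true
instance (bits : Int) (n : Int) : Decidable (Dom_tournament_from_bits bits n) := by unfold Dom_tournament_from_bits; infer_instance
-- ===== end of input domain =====

-- B replaces A's three sequential dict passes (zero-init, path arcs, gap-ordered bit counter)
-- with one direct pass computing each arc's value from a closed-form bit index (objective: alternative).

-- ===== PORT A =====
-- Transliteration of A: zero-init all ordered pairs, overwrite path arcs, then overwrite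
-- non-path arcs gap by gap, with a running bit counter idx in the fold state.
-- idx is always ≥ 0, so `.toNat` on the shift amount is exact for Python's `bits >> idx`.
def tournament_from_bits (bits : Int) (n : Int) : List (Int × Int × Int) :=
  let adj : PySem.Dict (Int × Int) Int := PySem.Dict.empty
  let adj := (PySem.List.pyRange 0 n 1).foldl (fun adj i =>
      (PySem.List.pyRange 0 n 1).foldl (fun adj j =>
        if i ≠ j then adj.insert (i, j) 0 else adj) adj) adj
  let adj := (PySem.List.pyRange 0 (n - 1) 1).foldl (fun adj i => adj.insert (i, i + 1) 1) adj
  let st := (PySem.List.pyRange 2 n 1).foldl (fun (st : PySem.Dict (Int × Int) Int × Int) gap =>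
      (PySem.List.pyRange 0 (n - gap) 1).foldl (fun st i =>
        let j := i + gap
        if PySem.Int.band (bits >>> st.2.toNat) 1 ≠ 0 then
          (((st.1.insert (i, j) 1).insert (j, i) 0), st.2 + 1)
        else
          (((st.1.insert (j, i) 1).insert (i, j) 0), st.2 + 1)) st) (adj, 0)
  st.1.items.map (fun p => (p.1.1, p.1.2, p.2))

-- ===== PORT B =====
-- B's helper val(i, j): the final value of arc (i, j), via the closed-form bit index.
-- idx is always ≥ 0 on the inputs B reaches, so `.toNat` is exact for Python's `>>`.
def tfbVal (bits : Int) (n : Int) (i : Int) (j : Int) : Int :=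
  if j = i + 1 then 1
  else if i = j + 1 then 0
  else
    let lo := if i < j then i else j
    let hi := if i < j then j else i
    let gap := hi - lo
    let idx := (gap - 2) * n - (PySem.Int.floordiv ((gap - 1) * gap) 2 - 1) + lo
    let b := PySem.Int.band (bits >>> idx.toNat) 1
    if i < j then b else 1 - b

def tournament_from_bits_alt (bits : Int) (n : Int) : List (Int × Int × Int) :=
  (PySem.List.pyRange 0 n 1).flatMap (fun i =>
    ((PySem.List.pyRange 0 n 1).filter (fun j => i ≠ j)).map (fun j => (i, j, tfbVal bits n i j)))

-- ===== PRECONDITION & SPEC =====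
def Spec_tournament_from_bits (bits : Int) (n : Int) (out : List (Int × Int × Int)) : Prop := out = tournament_from_bits_alt bits n
instance (bits : Int) (n : Int) (out : List (Int × Int × Int)) : Decidable (Spec_tournament_from_bits bits n out) := by unfold Spec_tournament_from_bits; infer_instance

-- ===== CLAIM (what is proved, stated in full; the proofs are below) =====
def Claim_equal_tournament_from_bits : Prop := ∀ (bits : Int) (n : Int), Dom_tournament_from_bits bits n → Spec_tournament_from_bits bits n (tournament_from_bits bits n)

-- ===== LEMMAS AND PROOFS =====

def pvIns (d : PySem.Dict (Int × Int) Int) (p : (Int × Int) × Int) : PySem.Dict (Int × Int) Int :=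
  d.insert p.1 p.2

def pvLookLast : List ((Int × Int) × Int) → (Int × Int) → Option Int
  | [], _ => none
  | p :: t, k =>
      match pvLookLast t k with
      | some v => some v
      | none => if p.1 = k then some p.2 else none

lemma pvLookLast_append (l1 l2 : List ((Int × Int) × Int)) (k : Int × Int) :
    pvLookLast (l1 ++ l2) k =
      match pvLookLast l2 k with
      | some v => some v
      | none => pvLookLast l1 k := by
  induction l1 with
  | nil => simp only [List.nil_append, pvLookLast]; cases pvLookLast l2 k <;> rfl
  | cons p t ih =>
      simp only [List.cons_append, pvLookLast, ih]
      cases pvLookLast l2 k <;> cases pvLookLast t k <;> rfl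

lemma pvLookLast_eq_none (l : List ((Int × Int) × Int)) (k : Int × Int)
    (h : ∀ p ∈ l, p.1 ≠ k) : pvLookLast l k = none := by
  induction l with
  | nil => rfl
  | cons p t ih =>
      simp only [pvLookLast, ih (fun q hq => h q (List.mem_cons_of_mem _ hq))]
      simp [h p List.mem_cons_self]

lemma pvItems_foldl (l : List ((Int × Int) × Int)) (d : PySem.Dict (Int × Int) Int)
    (h : ∀ p ∈ l, d.contains p.1 = true) :
    (l.foldl pvIns d).items
      = d.items.map (fun q => match pvLookLast l q.1 with | some v => (q.1, v) | none => q) := by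
  induction l generalizing d with
  | nil => simp [pvLookLast]
  | cons p t ih =>
      have hp := h p List.mem_cons_self
      have ht : ∀ q ∈ t, (d.insert p.1 p.2).contains q.1 = true := by
        intro q hq
        rw [PySem.Dict.contains_insert]
        simp [h q (List.mem_cons_of_mem _ hq)]
      rw [List.foldl_cons]
      show (t.foldl pvIns (d.insert p.1 p.2)).items = _
      rw [ih _ ht, PySem.Dict.items_insert_of_contains d p.2 hp, List.map_map]
      apply List.map_congr_left
      intro q hq
      simp only [Function.comp]
      by_cases hqk : q.1 = p.1
      · simp only [hqk, beq_self_eq_true, if_pos, pvLookLast]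
        cases hl : pvLookLast t p.1 <;> simp
      · have : (q.1 == p.1) = false := by simp [hqk]
        simp only [this, Bool.false_eq_true, if_false, pvLookLast]
        cases hl : pvLookLast t q.1 <;> simp [Ne.symm hqk]

def pvP0 (n : Int) : List ((Int × Int) × Int) :=
  (PySem.List.pyRange 0 n 1).flatMap (fun i =>
    ((PySem.List.pyRange 0 n 1).filter (fun j => i ≠ j)).map (fun j => ((i, j), (0 : Int))))

lemma pvInit_aux (n : Int) (L : List Int) (d : PySem.Dict (Int × Int) Int)
    (hL : L.Nodup) (hd : ∀ i ∈ L, ∀ k ∈ d.keys, k.1 ≠ i) :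
    (L.foldl (fun d i => (PySem.List.pyRange 0 n 1).foldl
        (fun d j => if i ≠ j then d.insert (i, j) 0 else d) d) d).items
      = d.items ++ L.flatMap (fun i =>
          ((PySem.List.pyRange 0 n 1).filter (fun j => i ≠ j)).map (fun j => ((i, j), (0 : Int)))) := by
  induction L generalizing d with
  | nil => simp
  | cons i L' ih =>
      have hfilter : ((PySem.List.pyRange 0 n 1).filter (fun j => i ≠ j)).foldl
          (fun d j => d.insert (i, j) 0) d
          = (PySem.List.pyRange 0 n 1).foldl
              (fun d j => if i ≠ j then d.insert (i, j) 0 else d) d := by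
        rw [List.foldl_filter]
        simp only [decide_eq_true_eq]
      have hfresh : ∀ j ∈ (PySem.List.pyRange 0 n 1).filter (fun j => i ≠ j),
          d.contains ((i, j)) = false := by
        intro j hj
        by_contra hc
        have hc' : d.contains (i, j) = true := by
          cases hcc : d.contains (i, j) with
          | true => rfl
          | false => exact absurd hcc hc
        exact hd i List.mem_cons_self (i, j) ((PySem.Dict.contains_iff_mem_keys d _).mp hc') rfl
      have hnd : (((PySem.List.pyRange 0 n 1).filter (fun j => i ≠ j)).map (fun j => ((i, j) : Int × Int))).Nodup := by
        refine List.Nodup.map ?_ ((PySem.List.nodup_pyRange_one 0 n).filter _)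
        intro a b hab
        simpa using congrArg Prod.snd hab
      have hinner := PySem.Dict.items_foldl_insert_fresh
        ((PySem.List.pyRange 0 n 1).filter (fun j => i ≠ j))
        (fun j => ((i, j) : Int × Int)) (fun _ => (0 : Int)) d hfresh hnd
      rw [List.foldl_cons, ← hfilter] at *
      set d' := ((PySem.List.pyRange 0 n 1).filter (fun j => i ≠ j)).foldl
        (fun d j => d.insert (i, j) 0) d with hd'
      have hd'items : d'.items = d.items ++ ((PySem.List.pyRange 0 n 1).filter (fun j => i ≠ j)).map
          (fun j => ((i, j), (0 : Int))) := hinner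
      have hd'keys : ∀ i' ∈ L', ∀ k ∈ d'.keys, k.1 ≠ i' := by
        intro i' hi' k hk
        have : k ∈ d'.items.map Prod.fst := hk
        rw [hd'items] at this
        simp only [List.map_append, List.mem_append, List.map_map] at this
        rcases this with h1 | h2
        · exact hd i' (List.mem_cons_of_mem _ hi') k h1
        · simp only [List.mem_map, Function.comp] at h2
          obtain ⟨j, _, rfl⟩ := h2
          intro hcontra
          simp only at hcontra
          subst hcontra
          exact (List.nodup_cons.mp hL).1 hi'
      rw [ih d' ((List.nodup_cons.mp hL).2) hd'keys, hd'items, List.flatMap_cons, List.append_assoc]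

lemma pvInit_items (n : Int) :
    ((PySem.List.pyRange 0 n 1).foldl (fun d i => (PySem.List.pyRange 0 n 1).foldl
        (fun d j => if i ≠ j then d.insert (i, j) 0 else d) d)
      (PySem.Dict.empty : PySem.Dict (Int × Int) Int)).items = pvP0 n := by
  rw [pvInit_aux n _ _ (PySem.List.nodup_pyRange_one 0 n)
      (by intro i _ k hk; rw [PySem.Dict.keys_empty] at hk; cases hk)]
  simp [pvP0, show (PySem.Dict.empty : PySem.Dict (Int × Int) Int).items = [] from rfl]

def pvUpd (bits gap idx i : Int) : List ((Int × Int) × Int) :=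
  if PySem.Int.band (bits >>> idx.toNat) 1 ≠ 0 then [((i, i + gap), 1), ((i + gap, i), 0)]
  else [((i + gap, i), 1), ((i, i + gap), 0)]

def pvBase (n gap : Int) : Int :=
  ((PySem.List.pyRange 2 gap 1).map (fun g => ((n - g).toNat : Int))).sum

def pvUpd2 (n : Int) : List ((Int × Int) × Int) :=
  (PySem.List.pyRange 0 (n - 1) 1).map (fun i => ((i, i + 1), (1 : Int)))

def pvUpd3 (bits n : Int) : List ((Int × Int) × Int) :=
  (PySem.List.pyRange 2 n 1).flatMap (fun gap =>
    (PySem.List.pyRange 0 (n - gap) 1).flatMap (fun i => pvUpd bits gap (pvBase n gap + i) i))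

lemma pvRange_toNat (a m : Int) (ha : 0 ≤ a) :
    PySem.List.pyRange a m 1 = PySem.List.pyRange a ((m.toNat : Int)) 1 := by
  by_cases h : 0 ≤ m
  · rw [Int.toNat_of_nonneg h]
  · rw [PySem.List.pyRange_one_eq_nil (by omega), PySem.List.pyRange_one_eq_nil (by omega)]

lemma pvInner (bits gap : Int) (m : Nat) (d : PySem.Dict (Int × Int) Int) (idx0 : Int) :
    (PySem.List.pyRange 0 (m : Int) 1).foldl
        (fun st i => ((pvUpd bits gap st.2 i).foldl pvIns st.1, st.2 + 1)) (d, idx0)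
      = (((PySem.List.pyRange 0 (m : Int) 1).flatMap (fun i => pvUpd bits gap (idx0 + i) i)).foldl pvIns d,
         idx0 + m) := by
  induction m with
  | zero => simp [PySem.List.pyRange_one_eq_nil]
  | succ m ih =>
      rw [show ((m + 1 : Nat) : Int) = (m : Int) + 1 by push_cast; ring,
          PySem.List.pyRange_one_succ_right (by positivity)]
      rw [List.foldl_append, List.flatMap_append, List.foldl_append, ih]
      simp only [List.foldl_cons, List.foldl_nil, List.flatMap_cons, List.flatMap_nil, List.append_nil]
      rw [add_assoc]

lemma pvBase_succ (n : Int) (G : Int) (hG : 2 ≤ G) :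
    pvBase n (G + 1) = pvBase n G + ((n - G).toNat : Int) := by
  unfold pvBase
  rw [PySem.List.pyRange_one_succ_right (by omega), List.map_append, List.sum_append]
  simp

lemma pvOuter (bits n : Int) (G : Nat) (d : PySem.Dict (Int × Int) Int) (idx0 : Int) :
    (PySem.List.pyRange 2 (G : Int) 1).foldl
      (fun st gap => (PySem.List.pyRange 0 (n - gap) 1).foldl
        (fun st i => ((pvUpd bits gap st.2 i).foldl pvIns st.1, st.2 + 1)) st) (d, idx0)
    = (((PySem.List.pyRange 2 (G : Int) 1).flatMap (fun gap =>
          (PySem.List.pyRange 0 (n - gap) 1).flatMap (fun i => pvUpd bits gap (idx0 + pvBase n gap + i) i))).foldl pvIns d,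
       idx0 + pvBase n (G : Int)) := by
  induction G with
  | zero =>
      rw [PySem.List.pyRange_one_eq_nil (by omega)]
      simp [pvBase, PySem.List.pyRange_one_eq_nil (by omega : (0:Int) ≤ 2)]
  | succ G ih =>
      by_cases hG : 2 ≤ (G : Int)
      · rw [show ((G + 1 : Nat) : Int) = (G : Int) + 1 by push_cast; ring,
            PySem.List.pyRange_one_succ_right hG]
        rw [List.foldl_append, List.flatMap_append, List.foldl_append, ih]
        simp only [List.foldl_cons, List.foldl_nil, List.flatMap_cons, List.flatMap_nil,
          List.append_nil]
        rw [pvRange_toNat 0 (n - G) le_rfl, pvInner, pvBase_succ n G hG]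
        rw [← pvRange_toNat 0 (n - G) le_rfl, add_assoc]
      · have h1 : (G : Int) + 1 ≤ 2 := by omega
        rw [show ((G + 1 : Nat) : Int) = (G : Int) + 1 by push_cast; ring]
        rw [PySem.List.pyRange_one_eq_nil h1]
        simp [pvBase, PySem.List.pyRange_one_eq_nil h1]

lemma pvBase_closed_nat (n : Int) (G : Nat) (h2 : 2 ≤ (G : Int)) (hn : (G : Int) ≤ n) :
    pvBase n (G : Int) = ((G : Int) - 2) * n - (((G : Int) - 1) * (G : Int) / 2 - 1) := by
  induction G with
  | zero => simp at h2
  | succ G ih =>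
      by_cases hG : 2 ≤ (G : Int)
      · have hGn : (G : Int) ≤ n := by push_cast at hn ⊢; omega
        rw [show ((G + 1 : Nat) : Int) = (G : Int) + 1 by push_cast; ring]
        rw [pvBase_succ n G hG, ih hG hGn]
        have htn : ((n - (G : Int)).toNat : Int) = n - (G : Int) := by
          rw [Int.toNat_of_nonneg (by push_cast at hn; omega)]
        rw [htn]
        obtain ⟨k, hk⟩ : Even (((G : Int) - 1) * (G : Int)) := by
          have := Int.even_mul_succ_self ((G : Int) - 1)
          simpa using this
        have hb : ((G : Int) + 1 - 1) * ((G : Int) + 1) = ((G : Int) - 1) * (G : Int) + 2 * (G : Int) := by ring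
        have hm1 : ((G : Int) + 1 - 2) * n = ((G : Int) - 2) * n + n := by ring
        rw [hb, hm1, hk]
        omega
      · have hG1 : (G : Int) = 1 := by push_cast at h2 ⊢; omega
        rw [show ((G + 1 : Nat) : Int) = (G : Int) + 1 by push_cast; ring, hG1]
        rw [show (1 : Int) + 1 = 2 from rfl]
        simp [pvBase, PySem.List.pyRange_one_eq_nil (le_refl (2:Int))]

lemma pvBase_closed (n gap : Int) (h2 : 2 ≤ gap) (hn : gap ≤ n) :
    pvBase n gap = (gap - 2) * n - (PySem.Int.floordiv ((gap - 1) * gap) 2 - 1) := by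
  rw [PySem.Int.floordiv_eq_ediv_of_pos (by norm_num)]
  have : gap = ((gap.toNat : Nat) : Int) := by omega
  rw [this] at h2 hn ⊢
  exact pvBase_closed_nat n gap.toNat h2 hn

lemma pvBit01 (bits : Int) (k : Nat) :
    PySem.Int.band (bits >>> k) 1 = 0 ∨ PySem.Int.band (bits >>> k) 1 = 1 := by
  rw [PySem.Int.band_one]
  have h1 := PySem.Int.mod_nonneg (bits >>> k) (b := 2) (by norm_num)
  have h2 := PySem.Int.mod_lt (bits >>> k) (b := 2) (by norm_num)
  omega

lemma pvL2_some (n i : Int) (hi : 0 ≤ i) (hin : i < n - 1) :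
    pvLookLast (pvUpd2 n) (i, i + 1) = some 1 := by
  unfold pvUpd2
  rw [PySem.List.pyRange_one_append 0 i (n - 1) hi (by omega),
      PySem.List.pyRange_one_cons (by omega : i < n - 1)]
  rw [List.map_append, List.map_cons, pvLookLast_append]
  have hpost : pvLookLast ((PySem.List.pyRange (i + 1) (n - 1) 1).map
      (fun a => ((a, a + 1), (1 : Int)))) (i, i + 1) = none := by
    apply pvLookLast_eq_none
    intro p hp
    simp only [List.mem_map] at hp
    obtain ⟨a, ha, rfl⟩ := hp
    rw [PySem.List.mem_pyRange_one] at ha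
    intro hc
    have := congrArg Prod.fst hc
    simp at this
    omega
  have hcons : pvLookLast (((i, i + 1), (1 : Int)) ::
      (PySem.List.pyRange (i + 1) (n - 1) 1).map (fun a => ((a, a + 1), (1 : Int)))) (i, i + 1)
      = some 1 := by
    simp only [pvLookLast, hpost]
    simp
  rw [hcons]

lemma pvUpd2_none (n : Int) (k : Int × Int) (h : ∀ a : Int, k ≠ (a, a + 1)) :
    pvLookLast (pvUpd2 n) k = none := by
  apply pvLookLast_eq_none
  intro p hp
  simp only [pvUpd2, List.mem_map] at hp
  obtain ⟨a, _, rfl⟩ := hp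
  exact fun hc => h a hc.symm

lemma pvUpd_fst (bits gap idx i : Int) (p : (Int × Int) × Int) (hp : p ∈ pvUpd bits gap idx i) :
    p.1 = (i, i + gap) ∨ p.1 = (i + gap, i) := by
  unfold pvUpd at hp
  split at hp <;> simp only [List.mem_cons, List.not_mem_nil, or_false] at hp <;>
    rcases hp with rfl | rfl <;> simp

lemma pvBlock_gap_none (bits n lo hi : Int) (a b : Int)
    (h : ∀ g i : Int, lo ≤ g → g < hi → ¬ ((a, b) = (i, i + g) ∨ (a, b) = (i + g, i))) :
    pvLookLast ((PySem.List.pyRange lo hi 1).flatMap (fun gap =>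
      (PySem.List.pyRange 0 (n - gap) 1).flatMap (fun i => pvUpd bits gap (pvBase n gap + i) i)))
      (a, b) = none := by
  apply pvLookLast_eq_none
  intro p hp
  simp only [List.mem_flatMap] at hp
  obtain ⟨g, hg, i, _, hpu⟩ := hp
  rw [PySem.List.mem_pyRange_one] at hg
  intro hc
  rcases pvUpd_fst _ _ _ _ _ hpu with h1 | h1 <;>
    exact h g i hg.1 hg.2 (by rw [← hc, h1]; simp [h1 ▸ hc])

lemma pvBlock_i_none (bits n g lo hi a b : Int)
    (h : ∀ i : Int, lo ≤ i → i < hi → ¬ ((a, b) = (i, i + g) ∨ (a, b) = (i + g, i))) :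
    pvLookLast ((PySem.List.pyRange lo hi 1).flatMap
      (fun i => pvUpd bits g (pvBase n g + i) i)) (a, b) = none := by
  apply pvLookLast_eq_none
  intro p hp
  simp only [List.mem_flatMap] at hp
  obtain ⟨i, hi, hpu⟩ := hp
  rw [PySem.List.mem_pyRange_one] at hi
  intro hc
  rcases pvUpd_fst _ _ _ _ _ hpu with h1 | h1 <;>
    exact h i hi.1 hi.2 (by rw [← hc, h1]; simp [h1 ▸ hc])

lemma pvUpd_look_fwd (bits g idx a : Int) (hg : 0 < g) :
    pvLookLast (pvUpd bits g idx a) (a, a + g)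
      = some (if PySem.Int.band (bits >>> idx.toNat) 1 ≠ 0 then 1 else 0) := by
  have hne : ((a + g, a) : Int × Int) ≠ (a, a + g) := by
    intro hc; rw [Prod.ext_iff] at hc; omega
  unfold pvUpd
  split <;> simp_all [pvLookLast]

lemma pvUpd_look_bwd (bits g idx a : Int) (hg : 0 < g) :
    pvLookLast (pvUpd bits g idx a) (a + g, a)
      = some (if PySem.Int.band (bits >>> idx.toNat) 1 ≠ 0 then 0 else 1) := by
  have hne : ((a, a + g) : Int × Int) ≠ (a + g, a) := by
    intro hc; rw [Prod.ext_iff] at hc; omega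
  unfold pvUpd
  split <;> simp_all [pvLookLast]

lemma pvL3a (bits n a b : Int) (ha : 0 ≤ a) (h2 : a + 2 ≤ b) (hb : b < n) :
    pvLookLast (pvUpd3 bits n) (a, b)
      = some (if PySem.Int.band (bits >>> (pvBase n (b - a) + a).toNat) 1 ≠ 0 then 1 else 0) := by
  set g := b - a with hg
  have hab : b = a + g := by omega
  unfold pvUpd3
  rw [PySem.List.pyRange_one_append 2 g n (by omega) (by omega),
      PySem.List.pyRange_one_cons (by omega : g < n),
      List.flatMap_append, List.flatMap_cons,
      PySem.List.pyRange_one_append 0 a (n - g) ha (by omega),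
      PySem.List.pyRange_one_cons (by omega : a < n - g),
      List.flatMap_append, List.flatMap_cons]
  simp only [pvLookLast_append]
  rw [pvBlock_gap_none bits n (g + 1) n a b
        (by intro g' i h1 h2' hc; rcases hc with hc | hc <;> (rw [Prod.ext_iff] at hc; simp at hc; omega)),
      pvBlock_gap_none bits n 2 g a b
        (by intro g' i h1 h2' hc; rcases hc with hc | hc <;> (rw [Prod.ext_iff] at hc; simp at hc; omega)),
      pvBlock_i_none bits n g (a + 1) (n - g) a b
        (by intro i h1 h2' hc; rcases hc with hc | hc <;> (rw [Prod.ext_iff] at hc; simp at hc; omega)),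
      pvBlock_i_none bits n g 0 a a b
        (by intro i h1 h2' hc; rcases hc with hc | hc <;> (rw [Prod.ext_iff] at hc; simp at hc; omega))]
  rw [hab, pvUpd_look_fwd bits g (pvBase n g + a) a (by omega)]

lemma pvL3b (bits n a b : Int) (ha : 0 ≤ a) (h2 : a + 2 ≤ b) (hb : b < n) :
    pvLookLast (pvUpd3 bits n) (b, a)
      = some (if PySem.Int.band (bits >>> (pvBase n (b - a) + a).toNat) 1 ≠ 0 then 0 else 1) := by
  set g := b - a with hg
  have hab : b = a + g := by omega
  unfold pvUpd3
  rw [PySem.List.pyRange_one_append 2 g n (by omega) (by omega),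
      PySem.List.pyRange_one_cons (by omega : g < n),
      List.flatMap_append, List.flatMap_cons,
      PySem.List.pyRange_one_append 0 a (n - g) ha (by omega),
      PySem.List.pyRange_one_cons (by omega : a < n - g),
      List.flatMap_append, List.flatMap_cons]
  simp only [pvLookLast_append]
  rw [pvBlock_gap_none bits n (g + 1) n b a
        (by intro g' i h1 h2' hc; rcases hc with hc | hc <;> (rw [Prod.ext_iff] at hc; simp at hc; omega)),
      pvBlock_gap_none bits n 2 g b a
        (by intro g' i h1 h2' hc; rcases hc with hc | hc <;> (rw [Prod.ext_iff] at hc; simp at hc; omega)),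
      pvBlock_i_none bits n g (a + 1) (n - g) b a
        (by intro i h1 h2' hc; rcases hc with hc | hc <;> (rw [Prod.ext_iff] at hc; simp at hc; omega)),
      pvBlock_i_none bits n g 0 a b a
        (by intro i h1 h2' hc; rcases hc with hc | hc <;> (rw [Prod.ext_iff] at hc; simp at hc; omega))]
  rw [hab, pvUpd_look_bwd bits g (pvBase n g + a) a (by omega)]

lemma pvUpd3_path_none (bits n a b : Int) (h : b = a + 1 ∨ a = b + 1) :
    pvLookLast (pvUpd3 bits n) (a, b) = none := by
  unfold pvUpd3
  exact pvBlock_gap_none bits n 2 n a b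
    (by intro g i h1 h2 hc; rcases hc with hc | hc <;>
      (rw [Prod.ext_iff] at hc; simp at hc; omega))

lemma pvVal_eq (bits n i j : Int) (hi : 0 ≤ i) (hin : i < n) (hj : 0 ≤ j) (hjn : j < n)
    (hij : i ≠ j) :
    (match pvLookLast (pvUpd2 n ++ pvUpd3 bits n) (i, j) with
      | some v => v
      | none => (0 : Int)) = tfbVal bits n i j := by
  rw [pvLookLast_append]
  by_cases h1 : j = i + 1
  · subst h1
    rw [pvUpd3_path_none bits n i (i + 1) (Or.inl rfl), pvL2_some n i hi (by omega)]
    simp [tfbVal]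
  · by_cases h2 : i = j + 1
    · rw [pvUpd3_path_none bits n i j (Or.inr h2),
          pvUpd2_none n (i, j) (by intro a hc; rw [Prod.ext_iff] at hc; simp at hc; omega)]
      simp [tfbVal, h2]
      omega
    · by_cases h3 : i < j
      · rw [pvL3a bits n i j hi (by omega) hjn]
        unfold tfbVal
        rw [if_neg h1, if_neg h2]
        simp only [if_pos h3]
        rw [← pvBase_closed n (j - i) (by omega) (by omega)]
        rcases pvBit01 bits ((pvBase n (j - i) + i).toNat) with hb | hb <;> simp [hb]
      · have h4 : j < i := by omega
        rw [pvL3b bits n j i hj (by omega) hin]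
        unfold tfbVal
        rw [if_neg h1, if_neg h2]
        simp only [if_neg h3]
        rw [← pvBase_closed n (i - j) (by omega) (by omega)]
        rcases pvBit01 bits ((pvBase n (i - j) + j).toNat) with hb | hb <;> simp [hb]

lemma pvStep3_eq (bits gap : Int) :
    (fun (st : PySem.Dict (Int × Int) Int × Int) (i : Int) =>
      if PySem.Int.band (bits >>> st.2.toNat) 1 ≠ 0 then
        (((st.1.insert (i, i + gap) 1).insert (i + gap, i) 0), st.2 + 1)
      else
        (((st.1.insert (i + gap, i) 1).insert (i, i + gap) 0), st.2 + 1))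
    = fun st i => ((pvUpd bits gap st.2 i).foldl pvIns st.1, st.2 + 1) := by
  funext st i
  unfold pvUpd
  split <;> rfl

lemma pvPhase2_eq (n : Int) (d : PySem.Dict (Int × Int) Int) :
    (PySem.List.pyRange 0 (n - 1) 1).foldl (fun d i => d.insert (i, i + 1) 1) d
      = (pvUpd2 n).foldl pvIns d := by
  unfold pvUpd2
  rw [List.foldl_map]
  rfl

lemma pvP0_keys_mem (n a b : Int) (ha : 0 ≤ a) (han : a < n) (hb : 0 ≤ b) (hbn : b < n)
    (hab : a ≠ b) : ((a, b) : Int × Int) ∈ (pvP0 n).map Prod.fst := by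
  simp only [pvP0, List.map_flatMap, List.mem_flatMap, List.map_map, List.mem_map,
    Function.comp, List.mem_filter, PySem.List.mem_pyRange_one, decide_eq_true_eq]
  exact ⟨a, ⟨ha, han⟩, b, ⟨⟨hb, hbn⟩, hab⟩, rfl⟩

lemma pvUpdAll_contains (bits n : Int) (d : PySem.Dict (Int × Int) Int) (h : d.items = pvP0 n) :
    ∀ p ∈ pvUpd2 n ++ pvUpd3 bits n, d.contains p.1 = true := by
  intro p hp
  rw [PySem.Dict.contains_iff_mem_keys]
  have hkeys : d.keys = (pvP0 n).map Prod.fst := by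
    simp only [PySem.Dict.keys, h]
  rw [hkeys]
  rcases List.mem_append.mp hp with h2 | h3
  · simp only [pvUpd2, List.mem_map] at h2
    obtain ⟨a, ha, rfl⟩ := h2
    rw [PySem.List.mem_pyRange_one] at ha
    exact pvP0_keys_mem n a (a + 1) ha.1 (by omega) (by omega) (by omega) (by omega)
  · simp only [pvUpd3, List.mem_flatMap] at h3
    obtain ⟨g, hg, i, hi, hpu⟩ := h3
    rw [PySem.List.mem_pyRange_one] at hg hi
    rcases pvUpd_fst _ _ _ _ _ hpu with h1 | h1 <;> rw [h1]
    · exact pvP0_keys_mem n i (i + g) hi.1 (by omega) (by omega) (by omega) (by omega)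
    · exact pvP0_keys_mem n (i + g) i (by omega) (by omega) hi.1 (by omega) (by omega)

lemma pvA_char (bits n : Int) :
    tournament_from_bits bits n
      = ((pvP0 n).map (fun q => match pvLookLast (pvUpd2 n ++ pvUpd3 bits n) q.1 with
          | some v => (q.1, v)
          | none => q)).map (fun p => (p.1.1, p.1.2, p.2)) := by
  simp only [tournament_from_bits]
  rw [pvPhase2_eq]
  simp only [pvStep3_eq]
  rw [pvRange_toNat 2 n (by norm_num), pvOuter bits n n.toNat _ 0]
  simp only [zero_add]
  rw [← pvRange_toNat 2 n (by norm_num)]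
  rw [show ((PySem.List.pyRange 2 n 1).flatMap (fun gap =>
      (PySem.List.pyRange 0 (n - gap) 1).flatMap (fun i => pvUpd bits gap (pvBase n gap + i) i)))
      = pvUpd3 bits n from rfl]
  rw [← List.foldl_append]
  rw [pvItems_foldl _ _ (pvUpdAll_contains bits n _ (pvInit_items n)), pvInit_items n]

lemma pvB_char (bits n : Int) :
    tournament_from_bits_alt bits n
      = ((pvP0 n).map (fun q => match pvLookLast (pvUpd2 n ++ pvUpd3 bits n) q.1 with
          | some v => (q.1, v)
          | none => q)).map (fun p => (p.1.1, p.1.2, p.2)) := by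
  unfold tournament_from_bits_alt pvP0
  rw [List.map_flatMap, List.map_flatMap]
  apply List.flatMap_congr
  intro i hi
  rw [List.map_map, List.map_map]
  apply List.map_congr_left
  intro j hj
  rw [PySem.List.mem_pyRange_one] at hi
  simp only [List.mem_filter, PySem.List.mem_pyRange_one, decide_eq_true_eq] at hj
  simp only [Function.comp]
  have hv := pvVal_eq bits n i j hi.1 hi.2 hj.1.1 hj.1.2 hj.2
  cases hL : pvLookLast (pvUpd2 n ++ pvUpd3 bits n) (i, j) <;> rw [hL] at hv <;> simp [← hv]

-- ===== VERDICT (by name: the statement is the Claim_ definition above) =====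
theorem tournament_from_bits_spec : Claim_equal_tournament_from_bits := by
  intro bits n _
  unfold Spec_tournament_from_bits
  exact (pvA_char bits n).trans (pvB_char bits n).symm
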